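-- pv_equiv track=rewrite | github.com/JeanLima2112/Born2BeRoot_training-2024-2025 | 2015-1a-fase/quadtree/quadtree.py | calc_quadtree
-- ===== SOURCE A (Python) =====
-- def calc_quadtree(quadtree: list[list]):
--     zeros = 0
--     ones = 0
--
--     for row in quadtree:
--         ones += row.count(1)
--         zeros += row.count(0)
--         if ones and zeros:
--             return 2
--
--     return 1 if ones else 0
-- ===== SOURCE B (Python) =====
-- def calc_quadtree(quadtree: list[list]):
--     has_one = any(1 in row for row in quadtree)
--     has_zero = any(0 in row for row in quadtree)
--     if has_one and has_zero:
--         return 2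
--     return 1 if has_one else 0
-- ===== Notes on version B (the rewrite author's own statement) =====
-- stated objective: idiomatic
-- what changed: Replaces the single counting pass with running zero/one tallies and an in-loop early return by two independent short-circuiting presence checks (any membership per value) combined at the end.
import Mathlib
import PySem

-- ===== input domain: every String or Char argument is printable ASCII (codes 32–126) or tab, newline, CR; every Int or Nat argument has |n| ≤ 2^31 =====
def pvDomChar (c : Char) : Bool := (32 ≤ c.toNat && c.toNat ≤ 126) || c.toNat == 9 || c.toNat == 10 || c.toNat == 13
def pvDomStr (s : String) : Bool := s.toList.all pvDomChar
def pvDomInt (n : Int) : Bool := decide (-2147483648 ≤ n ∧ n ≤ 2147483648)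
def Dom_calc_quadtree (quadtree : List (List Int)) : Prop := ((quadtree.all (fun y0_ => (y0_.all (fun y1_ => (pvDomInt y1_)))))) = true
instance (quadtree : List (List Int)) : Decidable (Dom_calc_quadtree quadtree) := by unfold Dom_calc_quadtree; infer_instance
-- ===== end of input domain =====

-- B: two independent short-circuiting presence checks instead of A's running counts with in-loop early return (idiomatic decomposition).
-- ===== PORT A =====
def calc_quadtree_go (zeros ones : Int) : List (List Int) → Int
  | [] => if ones ≠ 0 then 1 else 0
  | row :: rs =>
    let ones' := ones + (PySem.List.count row 1 : Int)
    let zeros' := zeros + (PySem.List.count row 0 : Int)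
    if ones' ≠ 0 ∧ zeros' ≠ 0 then 2 else calc_quadtree_go zeros' ones' rs

def calc_quadtree (quadtree : List (List Int)) : Int :=
  calc_quadtree_go 0 0 quadtree

-- ===== PORT B =====
def calc_quadtree_alt (quadtree : List (List Int)) : Int :=
  let has_one := quadtree.any (fun row => row.contains 1)
  let has_zero := quadtree.any (fun row => row.contains 0)
  if has_one && has_zero then 2 else if has_one then 1 else 0

-- ===== PRECONDITION & SPEC =====
def Spec_calc_quadtree (quadtree : List (List Int)) (out : Int) : Prop := out = calc_quadtree_alt quadtree
instance (quadtree : List (List Int)) (out : Int) : Decidable (Spec_calc_quadtree quadtree out) := by unfold Spec_calc_quadtree; infer_instance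

-- ===== CLAIM (what is proved, stated in full; the proofs are below) =====
def Claim_equal_calc_quadtree : Prop := ∀ (quadtree : List (List Int)), Dom_calc_quadtree quadtree → Spec_calc_quadtree quadtree (calc_quadtree quadtree)

-- ===== LEMMAS AND PROOFS =====

-- ===== VERDICT (by name: the statement is the Claim_ definition above) =====
lemma count_ne_zero_iff (acc : Int) (row : List Int) (v : Int) (h : 0 ≤ acc) :
    (acc + (PySem.List.count row v : Int) ≠ 0) ↔ (acc ≠ 0 ∨ row.contains v) := by
  rw [PySem.List.count_eq]
  rcases Decidable.em (v ∈ row) with hm | hm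
  · have : 0 < List.count v row := List.count_pos_iff.mpr hm
    simp [hm]
    omega
  · have : List.count v row = 0 := List.count_eq_zero.mpr hm
    simp [this, hm]

lemma calc_quadtree_go_char (rs : List (List Int)) :
    ∀ (zeros ones : Int), 0 ≤ zeros → 0 ≤ ones → ¬(ones ≠ 0 ∧ zeros ≠ 0) →
    calc_quadtree_go zeros ones rs =
      if (ones ≠ 0 ∨ rs.any (fun row => row.contains 1)) ∧
         (zeros ≠ 0 ∨ rs.any (fun row => row.contains 0)) then 2
      else if ones ≠ 0 ∨ rs.any (fun row => row.contains 1) then 1 else 0 := by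
  induction rs with
  | nil =>
    intro zeros ones _ _ hnb
    simp only [calc_quadtree_go, List.any_nil, or_false]
    split_ifs <;> tauto
  | cons row rs ih =>
    intro zeros ones hz ho hnb
    have hz' : (0:Int) ≤ zeros + (PySem.List.count row 0 : Int) := by positivity
    have ho' : (0:Int) ≤ ones + (PySem.List.count row 1 : Int) := by positivity
    have h1 := count_ne_zero_iff ones row 1 ho
    have h0 := count_ne_zero_iff zeros row 0 hz
    simp only [calc_quadtree_go]
    by_cases hb : (ones + (PySem.List.count row 1 : Int) ≠ 0) ∧
        (zeros + (PySem.List.count row 0 : Int) ≠ 0)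
    · rw [if_pos hb]
      have c1 : ones ≠ 0 ∨ row.contains 1 := h1.mp hb.1
      have c0 : zeros ≠ 0 ∨ row.contains 0 := h0.mp hb.2
      rw [if_pos]
      simp only [List.any_cons, Bool.or_eq_true]
      exact ⟨c1.imp id (fun h => Or.inl h), c0.imp id (fun h => Or.inl h)⟩
    · rw [if_neg hb, ih _ _ hz' ho' hb]
      simp only [h1, h0, List.any_cons, Bool.or_eq_true, or_assoc]

theorem calc_quadtree_spec : Claim_equal_calc_quadtree := by
  intro q _
  unfold Spec_calc_quadtree calc_quadtree calc_quadtree_alt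
  rw [calc_quadtree_go_char q 0 0 le_rfl le_rfl (by simp)]
  by_cases h1 : q.any (fun row => row.contains 1) <;>
    by_cases h0 : q.any (fun row => row.contains 0) <;> simp_all
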